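-- pv_equiv track=rewrite | github.com/Imwisagist/Leetcode_algorithm_tasks | easy/1935.Maximum Number of Words You Can Type.py | canBeTypedWords
-- ===== SOURCE A (Python) =====
-- def canBeTypedWords(text: str, brokenLetters: str) -> int:
--     counter: int = 0
--
--     for word in text.split():
--         for char in word:
--             if char in brokenLetters:
--                 break
--         else:
--             counter += 1
--
--     return counter
-- ===== SOURCE B (Python) =====
-- def canBeTypedWords(text: str, brokenLetters: str) -> int:
--     # Single character-level pass: a small state machine tracking whether we are
--     # inside a word and whether the current word is still typable; no split().
--     count = 0
--     in_word = False
--     ok = True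
--     for ch in text:
--         if ch.isspace():
--             if in_word and ok:
--                 count += 1
--             in_word = False
--             ok = True
--         else:
--             in_word = True
--             if ok and ch in brokenLetters:
--                 ok = False
--     if in_word and ok:
--         count += 1
--     return count
-- ===== Notes on version B (the rewrite author's own statement) =====
-- stated objective: alternative
-- what changed: Replaces split-into-words plus a per-word inner char loop by a single character-level state machine over the raw text (in_word/ok flags, count finalized at word boundaries), never materializing the word list.
import Mathlib
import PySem

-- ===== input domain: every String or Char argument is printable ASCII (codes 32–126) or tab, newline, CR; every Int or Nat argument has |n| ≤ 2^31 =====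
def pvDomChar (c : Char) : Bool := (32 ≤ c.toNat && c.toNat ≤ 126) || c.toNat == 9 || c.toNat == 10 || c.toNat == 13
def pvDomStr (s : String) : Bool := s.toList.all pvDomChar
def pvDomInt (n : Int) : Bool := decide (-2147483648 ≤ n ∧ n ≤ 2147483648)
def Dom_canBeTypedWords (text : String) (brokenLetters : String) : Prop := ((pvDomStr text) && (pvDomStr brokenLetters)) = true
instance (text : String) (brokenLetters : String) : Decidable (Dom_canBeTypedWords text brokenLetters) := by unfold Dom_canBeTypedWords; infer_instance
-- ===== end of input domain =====

-- B replaces split-into-words + per-word inner loop by a single character-level state machine over the raw text (alternative decomposition, same cost).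

-- ===== PORT A =====
def canBeTypedWords (text : String) (brokenLetters : String) : Int :=
  let counter : Int := 0
  let counter := (PySem.Str.split₀ text).foldl (fun counter word =>
    -- for char in word: if char in brokenLetters: break / else: counter += 1
    let ok := word.toList.foldl (fun ok char =>
      if PySem.Chars.isIn [char] brokenLetters.toList then false else ok) true
    if ok then counter + 1 else counter) counter
  counter

-- ===== PORT B =====
-- state: (count, in_word, ok); finalized once after the scan
def canBeTypedWords_alt (text : String) (brokenLetters : String) : Int :=
  let st : Int × Bool × Bool := text.toList.foldl (fun (s : Int × Bool × Bool) ch =>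
    let (count, inWord, ok) := s
    if PySem.Chars.isspace ch then
      (if inWord && ok then count + 1 else count, false, true)
    else
      (count, true, if ok && PySem.Chars.isIn [ch] brokenLetters.toList then false else ok))
    (0, false, true)
  if st.2.1 && st.2.2 then st.1 + 1 else st.1

-- ===== PRECONDITION & SPEC =====
def Spec_canBeTypedWords (text : String) (brokenLetters : String) (out : Int) : Prop := out = canBeTypedWords_alt text brokenLetters
instance (text : String) (brokenLetters : String) (out : Int) : Decidable (Spec_canBeTypedWords text brokenLetters out) := by unfold Spec_canBeTypedWords; infer_instance

-- ===== CLAIM (what is proved, stated in full; the proofs are below) =====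
def Claim_equal_canBeTypedWords : Prop := ∀ (text : String) (brokenLetters : String), Dom_canBeTypedWords text brokenLetters → Spec_canBeTypedWords text brokenLetters (canBeTypedWords text brokenLetters)

-- ===== LEMMAS AND PROOFS =====

-- "ok char" predicate and named forms of B's step/finalize (proof-side names for the port's lambdas)
def pvGood (bl : List Char) (c : Char) : Bool := !(PySem.Chars.isIn [c] bl)

def pvStep (bl : List Char) (s : Int × Bool × Bool) (ch : Char) : Int × Bool × Bool :=
  let (count, inWord, ok) := s
  if PySem.Chars.isspace ch then
    (if inWord && ok then count + 1 else count, false, true)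
  else
    (count, true, if ok && PySem.Chars.isIn [ch] bl then false else ok)

def pvFin (s : Int × Bool × Bool) : Int := if s.2.1 && s.2.2 then s.1 + 1 else s.1

-- A's inner for/else loop computes 'all chars good'
lemma word_ok_eq (bl : List Char) (w : List Char) :
    (w.foldl (fun ok char => if PySem.Chars.isIn [char] bl then false else ok) true)
      = w.all (pvGood bl) := by
  rw [PySem.List.foldl_if_false_eq]
  simp [pvGood, List.all_eq_not_any_not]

-- accumulator lemma for split₀.go
lemma go_acc (cs : List Char) : ∀ cur acc,
    PySem.Chars.split₀.go cs cur acc = acc.reverse ++ PySem.Chars.split₀.go cs cur [] := by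
  induction cs with
  | nil => intro cur acc; simp [PySem.Chars.split₀.go]; split_ifs <;> simp
  | cons c rest ih =>
      intro cur acc
      simp only [PySem.Chars.split₀.go]
      split_ifs with hsp hemp
      · exact ih [] acc
      · rw [ih [] (cur.reverse :: acc), ih [] [cur.reverse]]
        simp
      · exact ih (c :: cur) acc

-- B's scan computes count + (number of good words emitted by split₀.go)
lemma scan_eq (bl : List Char) (cs : List Char) : ∀ (cur : List Char) (count : Int),
    pvFin (cs.foldl (pvStep bl) (count, !cur.isEmpty, cur.all (pvGood bl)))
      = count + ((PySem.Chars.split₀.go cs cur []).countP (fun w => w.all (pvGood bl)) : Int) := by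
  induction cs with
  | nil =>
      intro cur count
      by_cases hemp : cur = []
      · subst hemp; simp [pvFin, PySem.Chars.split₀.go]
      · have hne : cur.isEmpty = false := by simp [hemp]
        by_cases hall : cur.all (pvGood bl) = true <;>
          simp [pvFin, PySem.Chars.split₀.go, hne, hall, List.countP_nil]
  | cons c rest ih =>
      intro cur count
      rw [List.foldl_cons]
      by_cases hsp : PySem.Chars.isspace c
      · by_cases hemp : cur = []
        · subst hemp
          have hstep : pvStep bl (count, !(List.isEmpty ([] : List Char)), ([] : List Char).all (pvGood bl)) c
              = (count, false, true) := by simp [pvStep, hsp]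
          rw [hstep]
          have h := ih [] count
          simp only [List.isEmpty_nil, Bool.not_true, List.all_nil] at h
          rw [h]
          simp [PySem.Chars.split₀.go, hsp]
        · have hne : cur.isEmpty = false := by simp [hemp]
          have hstep : pvStep bl (count, !cur.isEmpty, cur.all (pvGood bl)) c
              = ((if cur.all (pvGood bl) then count + 1 else count), false, true) := by
            simp [pvStep, hsp, hne]
          rw [hstep]
          have h := ih [] (if cur.all (pvGood bl) then count + 1 else count)
          simp only [List.isEmpty_nil, Bool.not_true, List.all_nil] at h
          rw [h]
          have hgo : PySem.Chars.split₀.go (c :: rest) cur []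
              = cur.reverse :: PySem.Chars.split₀.go rest [] [] := by
            simp only [PySem.Chars.split₀.go, hsp, hne]
            simp
            rw [go_acc rest [] [cur.reverse]]
            simp
          rw [hgo]
          by_cases hall : cur.all (pvGood bl) = true <;>
            simp [hall]; ring
      · have hstep : pvStep bl (count, !cur.isEmpty, cur.all (pvGood bl)) c
            = (count, !(List.isEmpty (c :: cur)), (c :: cur).all (pvGood bl)) := by
          simp only [pvStep, hsp, List.isEmpty_cons, Bool.not_false, List.all_cons]
          by_cases h : PySem.Chars.isIn [c] bl <;>
            by_cases ho : cur.all (pvGood bl) = true <;> simp [h, ho, pvGood]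
        rw [hstep, ih (c :: cur) count]
        have hgo : PySem.Chars.split₀.go (c :: rest) cur []
            = PySem.Chars.split₀.go rest (c :: cur) [] := by
          simp [PySem.Chars.split₀.go, hsp]
        rw [hgo]

-- ===== VERDICT (by name: the statement is the Claim_ definition above) =====
theorem canBeTypedWords_spec : Claim_equal_canBeTypedWords := by
  intro text brokenLetters _
  unfold Spec_canBeTypedWords canBeTypedWords
  simp only [word_ok_eq]
  rw [PySem.List.foldl_if_add_one]
  have halt : canBeTypedWords_alt text brokenLetters
      = pvFin (text.toList.foldl (pvStep brokenLetters.toList) (0, false, true)) := rfl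
  have h := scan_eq brokenLetters.toList text.toList [] 0
  simp only [List.isEmpty_nil, Bool.not_true, List.all_nil] at h
  rw [halt, h]
  simp [PySem.Str.split₀, PySem.Chars.split₀, List.countP_map, Function.comp_def]
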